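-- pv_equiv track=rewrite | github.com/punyidea/KnotTheory499 | smith_normal.py | min_nonzero_index
-- ===== SOURCE A (Python) =====
-- def min_nonzero_index(vect):
--     min_index= min_val = None
--     for ind,i in enumerate(vect):
--         if i !=0:
--             if not min_val:
--                 min_val,min_index = abs(i),ind
--             elif abs(i)<min_val:
--                 min_val,min_index = abs(i),ind
--     return min_index
-- ===== SOURCE B (Python) =====
-- def min_nonzero_index(vect):
--     nonzero_abs = [abs(x) for x in vect if x != 0]
--     if not nonzero_abs:
--         return None
--     m = min(nonzero_abs)
--     for ind, x in enumerate(vect):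
--         if x != 0 and abs(x) == m:
--             return ind
-- ===== Notes on version B (the rewrite author's own statement) =====
-- stated objective: alternative
-- what changed: Replaced the single scan that accumulates (min_val, min_index) with two independent passes: first compute the minimum absolute value of the nonzero entries, then find the first index whose entry attains it.
import Mathlib
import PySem

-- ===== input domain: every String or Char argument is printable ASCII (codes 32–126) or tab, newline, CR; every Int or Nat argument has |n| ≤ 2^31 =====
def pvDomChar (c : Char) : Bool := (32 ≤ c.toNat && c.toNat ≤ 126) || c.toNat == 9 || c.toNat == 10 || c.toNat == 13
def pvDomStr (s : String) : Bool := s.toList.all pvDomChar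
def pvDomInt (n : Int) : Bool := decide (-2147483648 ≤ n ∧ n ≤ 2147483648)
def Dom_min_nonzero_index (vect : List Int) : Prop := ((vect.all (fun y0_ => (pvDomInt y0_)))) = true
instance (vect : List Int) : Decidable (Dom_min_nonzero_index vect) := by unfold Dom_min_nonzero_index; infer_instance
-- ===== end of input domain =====

-- B replaces A's single accumulating (min_val, min_index) scan by two independent passes
-- (compute the minimum absolute value of the nonzero entries, then locate its first index);
-- same O(n) cost, different decomposition ("alternative").


-- ===== PORT A =====
-- the for-loop of A as structural recursion over the remaining list, carrying the
-- running index `ind` and the loop state (min_index, min_val); `mv.getD 0 = 0`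
-- transliterates Python's truthiness test `not min_val` (falsy for None and for 0)
def minAuxA : List Int → Int → Option Int → Option Int → Option Int
  | [], _, mi, _ => mi
  | i :: rest, ind, mi, mv =>
    if i ≠ 0 then
      if mv.getD 0 = 0 then minAuxA rest (ind + 1) (some ind) (some |i|)
      else if |i| < mv.getD 0 then minAuxA rest (ind + 1) (some ind) (some |i|)
      else minAuxA rest (ind + 1) mi mv
    else minAuxA rest (ind + 1) mi mv

def min_nonzero_index (vect : List Int) : Option Int :=
  minAuxA vect 0 none none

-- ===== PORT B =====
-- second pass of B: first index ind with vect[ind] != 0 and abs(vect[ind]) == m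
def bFind (m : Int) : List Int → Int → Option Int
  | [], _ => none
  | x :: xs, ind => if x ≠ 0 ∧ |x| = m then some ind else bFind m xs (ind + 1)

def min_nonzero_index_alt (vect : List Int) : Option Int :=
  let nonzeroAbs := (vect.filter (fun x => x != 0)).map (fun x => |x|)
  match PySem.List.min? nonzeroAbs (fun x => x) with
  | none => none
  | some m => bFind m vect 0

-- ===== PRECONDITION & SPEC =====
def Spec_min_nonzero_index (vect : List Int) (out : Option Int) : Prop := out = min_nonzero_index_alt vect
instance (vect : List Int) (out : Option Int) : Decidable (Spec_min_nonzero_index vect out) := by unfold Spec_min_nonzero_index; infer_instance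

-- ===== CLAIM (what is proved, stated in full; the proofs are below) =====
def Claim_equal_min_nonzero_index : Prop := ∀ (vect : List Int), Dom_min_nonzero_index vect → Spec_min_nonzero_index vect (min_nonzero_index vect)

-- ===== LEMMAS AND PROOFS =====

-- proof-only abbreviation: the min of the absolute values of the nonzero entries
def mAbs (xs : List Int) : Option Int :=
  PySem.List.min? ((xs.filter (fun x => x != 0)).map (fun x => |x|)) (fun x => x)

lemma foldl_min_assoc (l : List Int) (a b : Int) :
    l.foldl min (min a b) = min a (l.foldl min b) := by
  induction l generalizing b with
  | nil => simp
  | cons c t ih => simp [List.foldl, min_assoc, ih]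

lemma mAbs_cons_zero (xs : List Int) : mAbs (0 :: xs) = mAbs xs := by
  simp [mAbs]

lemma mAbs_cons_nonzero (i : Int) (xs : List Int) (hi : i ≠ 0) :
    mAbs (i :: xs) =
      some (match mAbs xs with
            | none => |i|
            | some m => min |i| m) := by
  unfold mAbs
  rw [List.filter_cons_of_pos (by simpa using hi)]
  rw [List.map_cons, PySem.List.min?_id_cons]
  rcases hxs : (xs.filter (fun x => x != 0)).map (fun x => |x|) with _ | ⟨r, rs⟩
  · simp [PySem.List.min?]
  · rw [PySem.List.min?_id_cons]
    simp only [Option.some.injEq, List.foldl]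
    rw [← foldl_min_assoc]

-- the loop invariant of A: with a positive running min `mv`, the loop returns the
-- index of the first strictly smaller nonzero |entry| if one exists, otherwise `mi`
lemma minAuxA_some (xs : List Int) : ∀ (ind : Int) (mi : Option Int) (mv : Int), 0 < mv →
    minAuxA xs ind mi (some mv) =
      match mAbs xs with
      | none => mi
      | some m => if m < mv then bFind m xs ind else mi := by
  induction xs with
  | nil => intro ind mi mv _; simp [minAuxA, mAbs, PySem.List.min?]
  | cons i t ih =>
    intro ind mi mv hmv
    by_cases hi : i = 0
    · subst hi
      rw [mAbs_cons_zero]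
      simp only [minAuxA, ne_eq, not_true_eq_false, if_false]
      rw [ih (ind + 1) mi mv hmv]
      rcases ht : mAbs t with _ | m
      · rfl
      · simp only
        split_ifs with hlt
        · simp [bFind]
        · rfl
    · have habs : 0 < |i| := abs_pos.mpr hi
      rw [mAbs_cons_nonzero i t hi]
      simp only [minAuxA, hi, ne_eq, not_false_eq_true, if_true, Option.getD_some]
      have hne : ¬ (mv = 0) := by omega
      rw [if_neg hne]
      by_cases hlt : |i| < mv
      · rw [if_pos hlt, ih (ind + 1) (some ind) |i| habs]
        rcases ht : mAbs t with _ | m'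
        · simp only
          rw [if_pos hlt]
          simp [bFind, hi]
        · simp only
          by_cases hmi : m' < |i|
          · rw [if_pos hmi]
            have h1 : min |i| m' = m' := by omega
            rw [h1, if_pos (by omega)]
            have : ¬ (i ≠ 0 ∧ |i| = m') := by
              rintro ⟨_, h⟩; omega
            simp [bFind, this]
          · rw [if_neg hmi]
            have h1 : min |i| m' = |i| := by omega
            rw [h1, if_pos hlt]
            simp [bFind, hi]
      · rw [if_neg hlt, ih (ind + 1) mi mv hmv]
        rcases ht : mAbs t with _ | m'
        · simp only
          rw [if_neg (by omega)]
        · simp only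
          by_cases hm' : m' < mv
          · rw [if_pos hm']
            have h1 : min |i| m' = m' := by omega
            rw [h1, if_pos hm']
            have : ¬ (i ≠ 0 ∧ |i| = m') := by
              rintro ⟨_, h⟩; omega
            simp [bFind, this]
          · rw [if_neg hm']
            have h1 : ¬ (min |i| m' < mv) := by omega
            rw [if_neg h1]

lemma minAuxA_none (xs : List Int) : ∀ (ind : Int),
    minAuxA xs ind none none =
      match mAbs xs with
      | none => none
      | some m => bFind m xs ind := by
  induction xs with
  | nil => intro ind; simp [minAuxA, mAbs, PySem.List.min?]
  | cons i t ih =>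
    intro ind
    by_cases hi : i = 0
    · subst hi
      rw [mAbs_cons_zero]
      simp only [minAuxA, ne_eq, not_true_eq_false, if_false]
      rw [ih (ind + 1)]
      rcases ht : mAbs t with _ | m
      · rfl
      · simp [bFind]
    · have habs : 0 < |i| := abs_pos.mpr hi
      rw [mAbs_cons_nonzero i t hi]
      simp only [minAuxA, hi, ne_eq, not_false_eq_true, if_true, Option.getD_none]
      rw [minAuxA_some t (ind + 1) (some ind) |i| habs]
      rcases ht : mAbs t with _ | m'
      · simp [bFind, hi]
      · simp only
        by_cases hmi : m' < |i|
        · rw [if_pos hmi]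
          have h1 : min |i| m' = m' := by omega
          rw [h1]
          have : ¬ (i ≠ 0 ∧ |i| = m') := by
            rintro ⟨_, h⟩; omega
          simp [bFind, this]
        · rw [if_neg hmi]
          have h1 : min |i| m' = |i| := by omega
          rw [h1]
          simp [bFind, hi]

-- ===== VERDICT (by name: the statement is the Claim_ definition above) =====
theorem min_nonzero_index_spec : Claim_equal_min_nonzero_index := by
  intro vect _
  unfold Spec_min_nonzero_index min_nonzero_index min_nonzero_index_alt
  rw [minAuxA_none vect 0]
  rcases h : mAbs vect with _ | m
  · unfold mAbs at h; simp only [h]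
  · unfold mAbs at h; simp only [h]
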